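-- pv_equiv track=rewrite | github.com/jahid674/PipeLens | # k3_exhaustive_demo.py | conflict_free
-- ===== SOURCE A (Python) =====
-- def conflict_free(combo, baseline_set):
--     seen_change = set()
--     seen_insert = set()
--     for kind, comp, strat, pos, sim in combo:
--         if kind == 'change':
--             if comp in seen_change or comp not in baseline_set:
--                 return False
--             seen_change.add(comp)
--         else:
--             if comp in seen_insert or comp in baseline_set or pos is None:
--                 return False
--             seen_insert.add(comp)
--     return True
-- ===== SOURCE B (Python) =====
-- def conflict_free(combo, baseline_set):
--     # Split once, then bulk-validate each group.
--     changes = [comp for kind, comp, strat, pos, sim in combo if kind == 'change']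
--     inserts = [(comp, pos) for kind, comp, strat, pos, sim in combo if kind != 'change']
--     if len(set(changes)) != len(changes):
--         return False
--     if not all(c in baseline_set for c in changes):
--         return False
--     insert_comps = [c for c, _ in inserts]
--     if len(set(insert_comps)) != len(insert_comps):
--         return False
--     if not all(c not in baseline_set and p is not None for c, p in inserts):
--         return False
--     return True
-- ===== Notes on version B (the rewrite author's own statement) =====
-- stated objective: simpler
-- what changed: Replaces the incremental seen-set scan with a single split of combo into change/insert groups followed by bulk aggregate checks (set-size duplicate test, all-membership tests), with no early-exit state machine.
import Mathlib
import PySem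

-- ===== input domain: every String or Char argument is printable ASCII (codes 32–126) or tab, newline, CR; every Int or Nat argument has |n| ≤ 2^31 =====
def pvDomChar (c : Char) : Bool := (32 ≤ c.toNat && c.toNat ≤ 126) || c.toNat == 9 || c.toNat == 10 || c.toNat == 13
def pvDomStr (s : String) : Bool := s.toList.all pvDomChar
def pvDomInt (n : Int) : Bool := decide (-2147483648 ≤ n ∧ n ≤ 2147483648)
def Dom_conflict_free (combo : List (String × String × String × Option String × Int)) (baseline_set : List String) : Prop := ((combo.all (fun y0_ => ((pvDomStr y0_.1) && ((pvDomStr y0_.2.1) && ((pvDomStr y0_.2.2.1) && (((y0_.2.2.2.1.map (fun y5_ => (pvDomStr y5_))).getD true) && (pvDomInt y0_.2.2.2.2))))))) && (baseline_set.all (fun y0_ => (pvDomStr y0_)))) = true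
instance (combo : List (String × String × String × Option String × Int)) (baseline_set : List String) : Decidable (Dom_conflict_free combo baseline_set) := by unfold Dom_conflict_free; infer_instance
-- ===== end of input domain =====

-- B replaces A's incremental seen-set scan by one split into change/insert groups
-- followed by bulk aggregate checks (objective: simpler decomposition; same cost).

-- ===== PORT A =====
-- literal transliteration of A's loop: two seen-sets, early return false on a violation
def conflict_free_loop (baseline_set : List String) :
    List (String × String × String × Option String × Int) →
    PySem.Set String → PySem.Set String → Bool
  | [], _, _ => true
  | (kind, comp, _strat, pos, _sim) :: rest, seen_change, seen_insert =>
    if kind == "change" then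
      if PySem.Set.contains seen_change comp || !(baseline_set.contains comp) then false
      else conflict_free_loop baseline_set rest (PySem.Set.add seen_change comp) seen_insert
    else
      if PySem.Set.contains seen_insert comp || baseline_set.contains comp || pos.isNone then false
      else conflict_free_loop baseline_set rest seen_change (PySem.Set.add seen_insert comp)

def conflict_free (combo : List (String × String × String × Option String × Int)) (baseline_set : List String) : Bool :=
  conflict_free_loop baseline_set combo PySem.Set.empty PySem.Set.empty

-- ===== PORT B =====
-- the two comprehensions of Source B
def cfChanges (combo : List (String × String × String × Option String × Int)) : List String :=
  combo.filterMap (fun t => if t.1 == "change" then some t.2.1 else none)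

def cfInserts (combo : List (String × String × String × Option String × Int)) : List (String × Option String) :=
  combo.filterMap (fun t => if t.1 == "change" then none else some (t.2.1, t.2.2.2.1))

def conflict_free_alt (combo : List (String × String × String × Option String × Int)) (baseline_set : List String) : Bool :=
  let changes := cfChanges combo
  let inserts := cfInserts combo
  if (PySem.Set.ofList changes).length != changes.length then false
  else if !(changes.all (fun c => baseline_set.contains c)) then false
  else
    let insert_comps := inserts.map (fun cp => cp.1)
    if (PySem.Set.ofList insert_comps).length != insert_comps.length then false
    else if !(inserts.all (fun cp => !(baseline_set.contains cp.1) && cp.2.isSome)) then false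
    else true

-- ===== PRECONDITION & SPEC =====
def Spec_conflict_free (combo : List (String × String × String × Option String × Int)) (baseline_set : List String) (out : Bool) : Prop := out = conflict_free_alt combo baseline_set
instance (combo : List (String × String × String × Option String × Int)) (baseline_set : List String) (out : Bool) : Decidable (Spec_conflict_free combo baseline_set out) := by unfold Spec_conflict_free; infer_instance

-- ===== CLAIM (what is proved, stated in full; the proofs are below) =====
def Claim_equal_conflict_free : Prop := ∀ (combo : List (String × String × String × Option String × Int)) (baseline_set : List String), Dom_conflict_free combo baseline_set → Spec_conflict_free combo baseline_set (conflict_free combo baseline_set)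

-- ===== LEMMAS AND PROOFS =====

-- set(xs) built by folding add is a sublist of the source list
lemma update_sublist {α : Type} [BEq α] (cs : List α) :
    ∀ s : List α, (PySem.Set.update s cs).Sublist (s ++ cs) := by
  induction cs with
  | nil => intro s; simp [PySem.Set.update]
  | cons c r ih =>
    intro s
    have h1 : PySem.Set.update s (c :: r) = PySem.Set.update (PySem.Set.add s c) r := rfl
    have h2 := ih (PySem.Set.add s c)
    have h3 : (PySem.Set.add s c ++ r).Sublist (s ++ c :: r) := by
      unfold PySem.Set.add
      split
      · exact (List.sublist_cons_self c r).append_left s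
      · have he : s ++ [c] ++ r = s ++ c :: r := by simp
        rw [he]
    exact h1 ▸ h2.trans h3

lemma ofList_length_iff {α : Type} [BEq α] [LawfulBEq α] (cs : List α) :
    (PySem.Set.ofList cs).length = cs.length ↔ cs.Nodup := by
  constructor
  · intro h
    have hsub : (PySem.Set.ofList cs).Sublist cs := by
      have := update_sublist cs ([] : List α)
      simpa [PySem.Set.ofList_eq_foldl, PySem.Set.update] using this
    have := hsub.eq_of_length h
    have hnd := PySem.Set.nodup_ofList (xs := cs)
    rwa [this] at hnd
  · intro h
    rw [PySem.Set.ofList_eq_self_of_nodup _ h]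

-- characterisation of A's loop in terms of the two split groups
lemma loop_char (bs : List String) (combo : List (String × String × String × Option String × Int)) :
    ∀ sc si : PySem.Set String,
    (conflict_free_loop bs combo sc si = true ↔
      ((cfChanges combo).Nodup ∧ (∀ c ∈ cfChanges combo, c ∉ sc ∧ c ∈ bs) ∧
       ((cfInserts combo).map Prod.fst).Nodup ∧
       (∀ cp ∈ cfInserts combo, cp.1 ∉ si ∧ cp.1 ∉ bs ∧ cp.2.isSome))) := by
  induction combo with
  | nil => intro sc si; simp [conflict_free_loop, cfChanges, cfInserts]
  | cons t rest ih =>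
    intro sc si
    obtain ⟨kind, comp, strat, pos, sim⟩ := t
    by_cases hk : (kind == "change") = true
    · have hke : kind = "change" := by simpa using hk
      have hloop : conflict_free_loop bs ((kind, comp, strat, pos, sim) :: rest) sc si =
          (if PySem.Set.contains sc comp || !(bs.contains comp) then false
           else conflict_free_loop bs rest (PySem.Set.add sc comp) si) := by
        simp [conflict_free_loop, hk]
      have hch : cfChanges ((kind, comp, strat, pos, sim) :: rest) = comp :: cfChanges rest := by
        simp [cfChanges, hke]
      have hin : cfInserts ((kind, comp, strat, pos, sim) :: rest) = cfInserts rest := by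
        simp [cfInserts, hke]
      rw [hloop, hch, hin]
      by_cases hv : (PySem.Set.contains sc comp || !(bs.contains comp)) = true
      · rw [if_pos hv]
        simp only [Bool.false_eq_true, false_iff]
        rintro ⟨hnd, hall, -, -⟩
        have := hall comp (List.mem_cons_self ..)
        rcases Bool.or_eq_true _ _ |>.mp hv with h | h
        · exact this.1 ((PySem.Set.contains_iff sc comp).mp h)
        · rw [Bool.not_eq_true', List.contains_eq_mem, decide_eq_false_iff_not] at h
          exact h this.2
      · rw [if_neg hv, ih (PySem.Set.add sc comp) si]
        have hnsc : comp ∉ sc := by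
          intro h; exact hv (by simp [h])
        have hbs : comp ∈ bs := by
          by_contra h; exact hv (by simp [List.contains_eq_mem, h])
        constructor
        · rintro ⟨hnd, hall, hndI, hallI⟩
          refine ⟨List.nodup_cons.mpr ⟨?_, hnd⟩, ?_, hndI, hallI⟩
          · intro hmem
            have := (hall comp hmem).1
            simp [PySem.Set.mem_add] at this
          · intro c hc
            rcases List.mem_cons.mp hc with h | h
            · subst h; exact ⟨hnsc, hbs⟩
            · have := hall c h
              rw [PySem.Set.mem_add, not_or] at this
              exact ⟨this.1.1, this.2⟩
        · rintro ⟨hnd, hall, hndI, hallI⟩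
          have hnd' := List.nodup_cons.mp hnd
          refine ⟨hnd'.2, ?_, hndI, hallI⟩
          intro c hc
          have := hall c (List.mem_cons_of_mem _ hc)
          refine ⟨?_, this.2⟩
          rw [PySem.Set.mem_add, not_or]
          exact ⟨this.1, fun h => hnd'.1 (h ▸ hc)⟩
    · have hkne : kind ≠ "change" := by simpa using hk
      have hloop : conflict_free_loop bs ((kind, comp, strat, pos, sim) :: rest) sc si =
          (if PySem.Set.contains si comp || bs.contains comp || pos.isNone then false
           else conflict_free_loop bs rest sc (PySem.Set.add si comp)) := by
        simp [conflict_free_loop, hk]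
      have hch : cfChanges ((kind, comp, strat, pos, sim) :: rest) = cfChanges rest := by
        simp [cfChanges, hkne]
      have hin : cfInserts ((kind, comp, strat, pos, sim) :: rest) =
          (comp, pos) :: cfInserts rest := by
        simp [cfInserts, hkne]
      rw [hloop, hch, hin]
      by_cases hv : (PySem.Set.contains si comp || bs.contains comp || pos.isNone) = true
      · rw [if_pos hv]
        simp only [Bool.false_eq_true, false_iff]
        rintro ⟨-, -, -, hall⟩
        have := hall (comp, pos) (List.mem_cons_self ..)
        rcases Bool.or_eq_true _ _ |>.mp hv with h | h
        · rcases Bool.or_eq_true _ _ |>.mp h with h' | h'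
          · exact this.1 ((PySem.Set.contains_iff si comp).mp h')
          · rw [List.contains_eq_mem, decide_eq_true_eq] at h'
            exact this.2.1 h'
        · rw [Option.isNone_iff_eq_none] at h
          have h3 := this.2.2
          rw [h] at h3; simp at h3
      · rw [if_neg hv, ih sc (PySem.Set.add si comp)]
        have hnsi : comp ∉ si := by
          intro h; exact hv (by simp [h])
        have hnbs : comp ∉ bs := by
          intro h; exact hv (by simp [List.contains_eq_mem, h])
        have hps : pos.isSome = true := by
          cases pos with
          | none => exact absurd (by simp) hv
          | some _ => rfl
        constructor
        · rintro ⟨hnd, hall, hndI, hallI⟩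
          refine ⟨hnd, hall, List.nodup_cons.mpr ⟨?_, hndI⟩, ?_⟩
          · intro hmem
            rcases List.mem_map.mp hmem with ⟨cp, hcp, hfst⟩
            have := (hallI cp hcp).1
            rw [PySem.Set.mem_add, not_or] at this
            exact this.2 (by simpa using hfst)
          · intro cp hcp
            rcases List.mem_cons.mp hcp with h | h
            · subst h; exact ⟨hnsi, hnbs, hps⟩
            · have := hallI cp h
              rw [PySem.Set.mem_add, not_or] at this
              exact ⟨this.1.1, this.2⟩
        · rintro ⟨hnd, hall, hndI, hallI⟩
          have hndI' := List.nodup_cons.mp hndI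
          refine ⟨hnd, hall, hndI'.2, ?_⟩
          intro cp hcp
          have := hallI cp (List.mem_cons_of_mem _ hcp)
          refine ⟨?_, this.2.1, this.2.2⟩
          rw [PySem.Set.mem_add, not_or]
          exact ⟨this.1, fun h => hndI'.1 (List.mem_map.mpr ⟨cp, hcp, by simpa using h⟩)⟩

lemma alt_char (combo : List (String × String × String × Option String × Int)) (bs : List String) :
    conflict_free_alt combo bs = true ↔
      ((cfChanges combo).Nodup ∧ (∀ c ∈ cfChanges combo, c ∈ bs) ∧
       ((cfInserts combo).map Prod.fst).Nodup ∧
       (∀ cp ∈ cfInserts combo, cp.1 ∉ bs ∧ cp.2.isSome)) := by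
  unfold conflict_free_alt
  dsimp only
  have hmap : (cfInserts combo).map (fun cp => cp.1) = (cfInserts combo).map Prod.fst := rfl
  rw [hmap]
  split_ifs with h1 h2 h3 h4 <;>
    simp_all [-List.length_map, ofList_length_iff, List.contains_eq_mem,
      Option.isSome_iff_ne_none, not_forall] <;>
    tauto

-- ===== VERDICT (by name: the statement is the Claim_ definition above) =====
theorem conflict_free_spec : Claim_equal_conflict_free := by
  intro combo bs _
  unfold Spec_conflict_free conflict_free
  rw [Bool.eq_iff_iff, loop_char, alt_char]
  simp [PySem.Set.empty]
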